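-- pv_equiv track=rewrite | github.com/genericusername321/AdventOfCode2020 | day6/day6.py | countAnswers
-- ===== SOURCE A (Python) =====
-- def countAnswers(groupAns):
--     # Solution for part1 and part2
--     total = 0
--     for ans in groupAns:
--         ans = ans.rstrip().split('\n')
--         answers = [set(a) for a in ans]
--
--         # Replace union with intersection for part 2
--         union = answers[0].union(*answers)
--         total += len(union)
--
--     return total
-- ===== SOURCE B (Python) =====
-- def countAnswers(groupAns):
--     # B: sort-then-scan instead of sets. Per group, sort all characters of the
--     # rstripped text and walk the sorted runs, counting each run head that is
--     # not a newline; equal characters are adjacent after sorting, so this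
--     # counts exactly the distinct non-newline characters. No sets, no split.
--     total = 0
--     for ans in groupAns:
--         prev = None
--         for c in sorted(ans.rstrip()):
--             if c != '\n' and c != prev:
--                 total += 1
--             prev = c
--     return total
-- ===== Notes on version B (the rewrite author's own statement) =====
-- stated objective: alternative
-- what changed: B replaces the per-line sets and their n-ary union with a sort-then-scan: it sorts each group's characters and counts run heads (characters differing from their predecessor) that are not newlines, so no set is ever built.
import Mathlib
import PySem

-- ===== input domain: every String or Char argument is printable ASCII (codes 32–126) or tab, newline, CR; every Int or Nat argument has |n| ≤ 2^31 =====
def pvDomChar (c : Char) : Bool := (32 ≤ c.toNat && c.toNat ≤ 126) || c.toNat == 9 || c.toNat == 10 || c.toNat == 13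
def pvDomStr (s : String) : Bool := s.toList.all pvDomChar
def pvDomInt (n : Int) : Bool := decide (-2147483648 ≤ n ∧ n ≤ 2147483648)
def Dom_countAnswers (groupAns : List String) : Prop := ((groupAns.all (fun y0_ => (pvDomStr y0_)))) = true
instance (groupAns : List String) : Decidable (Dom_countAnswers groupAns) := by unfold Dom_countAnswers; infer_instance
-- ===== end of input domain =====

-- B replaces the per-line sets and their union with a sort-then-scan that
-- counts run heads of the sorted group text (alternative algorithm, no sets).

-- ===== PORT A =====
-- answers[0]: split('\n') always returns a non-empty list, so Python never
-- raises here; the total form pyGetD with default [] is exact on every input.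
def countAnswers (groupAns : List String) : Int :=
  groupAns.foldl (fun total ans =>
    let lines := PySem.Chars.splitOn (PySem.Chars.rstrip ans.toList) ['\n']
    let answers := lines.map (fun a => PySem.Set.ofList a)
    let union := answers.foldl PySem.Set.union (PySem.List.pyGetD answers 0 [])
    total + PySem.Set.len union) 0

-- ===== PORT B =====
def countAnswers_alt (groupAns : List String) : Int :=
  groupAns.foldl (fun total ans =>
    ((PySem.List.sorted (PySem.Chars.rstrip ans.toList) (fun c => c) false).foldl
      (fun (st : Int × Option Char) c =>
        (if c ≠ '\n' ∧ some c ≠ st.2 then st.1 + 1 else st.1, some c))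
      (total, none)).1) 0

-- ===== PRECONDITION & SPEC =====
def Spec_countAnswers (groupAns : List String) (out : Int) : Prop := out = countAnswers_alt groupAns
instance (groupAns : List String) (out : Int) : Decidable (Spec_countAnswers groupAns out) := by unfold Spec_countAnswers; infer_instance

-- ===== CLAIM =====
def Claim_equal_countAnswers : Prop := ∀ (groupAns : List String), Dom_countAnswers groupAns → Spec_countAnswers groupAns (countAnswers groupAns)

-- ===== LEMMAS AND PROOFS =====

-- Concatenating the pieces of a single-character split gives the string with
-- that character filtered out (fuel-indexed worker of PySem.Chars.splitOn).
theorem pv_go_flatten (c : Char) (fuel : Nat) :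
    ∀ (l cur : List Char) (acc : List (List Char)), l.length ≤ fuel →
      (PySem.Chars.splitOn.go [c] fuel l cur acc).flatten
        = acc.reverse.flatten ++ cur.reverse ++ l.filter (fun x => x ≠ c) := by
  induction fuel with
  | zero =>
    intro l cur acc h
    have hl : l = [] := List.eq_nil_of_length_eq_zero (Nat.le_zero.mp h)
    subst hl
    simp [PySem.Chars.splitOn.go]
  | succ f ih =>
    intro l cur acc h
    cases l with
    | nil => simp [PySem.Chars.splitOn.go]
    | cons x rest =>
      by_cases hx : x = c
      · subst hx
        have : PySem.Chars.splitOn.go [x] (f + 1) (x :: rest) cur acc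
            = PySem.Chars.splitOn.go [x] f rest [] (cur.reverse :: acc) := by
          simp [PySem.Chars.splitOn.go, List.isPrefixOf]
        rw [this, ih rest [] (cur.reverse :: acc) (by simpa using Nat.lt_succ_iff.mp (Nat.lt_of_lt_of_le (by simp) h))]
        simp
      · have : PySem.Chars.splitOn.go [c] (f + 1) (x :: rest) cur acc
            = PySem.Chars.splitOn.go [c] f rest (x :: cur) acc := by
          simp [PySem.Chars.splitOn.go, List.isPrefixOf, Ne.symm hx]
        rw [this, ih rest (x :: cur) acc (by simpa using Nat.lt_succ_iff.mp (Nat.lt_of_lt_of_le (by simp) h))]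
        simp [hx]

theorem pv_flatten_splitOn (cs : List Char) (c : Char) :
    (PySem.Chars.splitOn cs [c]).flatten = cs.filter (fun x => x ≠ c) := by
  have := pv_go_flatten c (cs.length + 1) cs [] [] (by omega)
  simpa [PySem.Chars.splitOn] using this

theorem pv_mem_foldl_union {α : Type} [BEq α] [LawfulBEq α]
    (ls : List (PySem.Set α)) (s : PySem.Set α) (x : α) :
    x ∈ ls.foldl PySem.Set.union s ↔ x ∈ s ∨ ∃ t ∈ ls, x ∈ t := by
  induction ls generalizing s with
  | nil => simp
  | cons t ts ih =>
    simp only [List.foldl_cons, ih, PySem.Set.union, PySem.Set.mem_update, List.mem_cons]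
    constructor
    · rintro (⟨h | h⟩ | ⟨u, hu, hx⟩)
      · exact Or.inl h
      · exact Or.inr ⟨t, Or.inl rfl, h⟩
      · exact Or.inr ⟨u, Or.inr hu, hx⟩
    · rintro (h | ⟨u, (rfl | hu), hx⟩)
      · exact Or.inl (Or.inl h)
      · exact Or.inl (Or.inr hx)
      · exact Or.inr ⟨u, hu, hx⟩

theorem pv_nodup_foldl_union {α : Type} [BEq α] [LawfulBEq α]
    (ls : List (PySem.Set α)) (s : PySem.Set α) (hs : s.Nodup) :
    (ls.foldl PySem.Set.union s).Nodup := by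
  induction ls generalizing s with
  | nil => exact hs
  | cons t ts ih => exact ih _ (PySem.Set.nodup_union _ _ hs)

-- A's per-group value is the number of distinct non-newline chars of the text.
theorem pv_groupA_eq (cs : List Char) :
    (let lines := PySem.Chars.splitOn (PySem.Chars.rstrip cs) ['\n']
     let answers := lines.map (fun a => PySem.Set.ofList a)
     PySem.Set.len (answers.foldl PySem.Set.union (PySem.List.pyGetD answers 0 [])))
    = (((PySem.Chars.rstrip cs).filter (fun c => c ≠ '\n')).toFinset.card : Int) := by
  set r := PySem.Chars.rstrip cs with hr
  set lines := PySem.Chars.splitOn r ['\n'] with hl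
  set answers := lines.map (fun a => PySem.Set.ofList a) with ha
  set first : PySem.Set Char := PySem.List.pyGetD answers 0 [] with hf
  have hfirst_mem : ∀ x : Char, x ∈ first → ∃ t ∈ answers, x ∈ t := by
    intro x hx
    cases hans : answers with
    | nil => simp [hf, hans, PySem.List.pyGetD, PySem.List.pyGet?] at hx
    | cons a as =>
      refine ⟨a, by simp, ?_⟩
      have : first = a := by simp [hf, hans, PySem.List.pyGetD, PySem.List.pyGet?, PySem.List.pyIdx?]
      rwa [this] at hx
  have hfn : first.Nodup := by
    cases hans : answers with
    | nil => simp [hf, hans, PySem.List.pyGetD, PySem.List.pyGet?]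
    | cons a as =>
      have : first = a := by simp [hf, hans, PySem.List.pyGetD, PySem.List.pyGet?, PySem.List.pyIdx?]
      rw [this]
      have : a ∈ answers := by simp [hans]
      obtain ⟨l, _, rfl⟩ := List.mem_map.mp (ha ▸ this)
      exact PySem.Set.nodup_ofList l
  have hmem : ∀ x : Char,
      x ∈ answers.foldl PySem.Set.union first ↔ x ∈ r.filter (fun c => c ≠ '\n') := by
    intro x
    rw [pv_mem_foldl_union]
    have hexists : (∃ t ∈ answers, x ∈ t) ↔ x ∈ r.filter (fun c => c ≠ '\n') := by
      rw [← pv_flatten_splitOn r '\n', ← hl, List.mem_flatten]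
      constructor
      · rintro ⟨t, ht, hx⟩
        obtain ⟨l, hlmem, rfl⟩ := List.mem_map.mp (ha ▸ ht)
        exact ⟨l, hlmem, (PySem.Set.mem_ofList _ _).mp hx⟩
      · rintro ⟨l, hlmem, hx⟩
        exact ⟨PySem.Set.ofList l, List.mem_map.mpr ⟨l, hlmem, rfl⟩,
          (PySem.Set.mem_ofList _ _).mpr hx⟩
    constructor
    · rintro (h | h)
      · exact hexists.mp (hfirst_mem x h)
      · exact hexists.mp h
    · intro h; exact Or.inr (hexists.mpr h)
  have hnd : (answers.foldl PySem.Set.union first).Nodup := pv_nodup_foldl_union _ _ hfn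
  have hlen : (answers.foldl PySem.Set.union first).length
      = (r.filter (fun c => c ≠ '\n')).toFinset.card := by
    rw [← List.toFinset_card_of_nodup hnd]
    congr 1
    apply Finset.ext
    intro x
    simp only [List.mem_toFinset]
    exact hmem x
  simpa [PySem.Set.len] using congrArg (fun n : Nat => (n : Int)) hlen

-- B's scan over a sorted list counts the distinct non-newline values other
-- than the one tracked in `prev` (a strict lower bound of the list).
theorem pv_runB (s : List Char) (hs : s.Pairwise (· ≤ ·)) :
    ∀ (t : Int) (prev : Option Char), (∀ p, prev = some p → ∀ x ∈ s, p ≤ x) →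
      (s.foldl (fun (st : Int × Option Char) c =>
          (if c ≠ '\n' ∧ some c ≠ st.2 then st.1 + 1 else st.1, some c)) (t, prev)).1
        = t + ((s.toFinset.filter (fun x => x ≠ '\n' ∧ some x ≠ prev)).card : Int) := by
  induction s with
  | nil => intro t prev _; simp
  | cons c cs ih =>
    intro t prev hp
    have hcs : cs.Pairwise (· ≤ ·) := hs.tail
    have hcl : ∀ x ∈ cs, c ≤ x := fun x hx => List.rel_of_pairwise_cons hs hx
    have key : ((c :: cs).toFinset.filter (fun x => x ≠ '\n' ∧ some x ≠ prev)).card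
        = (if c ≠ '\n' ∧ some c ≠ prev then 1 else 0)
          + (cs.toFinset.filter (fun x => x ≠ '\n' ∧ some x ≠ some c)).card := by
      have hins : (c :: cs).toFinset = insert c cs.toFinset := by simp
      by_cases hcp : some c ≠ prev
      · -- prev strictly below everything in the list
        have hne : ∀ x ∈ cs.toFinset, (some x ≠ prev) := by
          intro x hx
          cases prev with
          | none => simp
          | some p =>
            have hpc : p ≤ c := hp p rfl c (by simp)
            have hpc' : p ≠ c := fun h => hcp (by simp [h])
            have : p < x := lt_of_lt_of_le (lt_of_le_of_ne hpc hpc')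
              (hcl x (List.mem_toFinset.mp hx))
            simp
            exact fun h => absurd h.symm (ne_of_lt this)
        by_cases hnl : c ≠ '\n'
        · -- c counts; the rest of the filters agree except for c itself
          have hfc : cs.toFinset.filter (fun x => x ≠ '\n' ∧ some x ≠ some c)
              = (cs.toFinset.filter (fun x => x ≠ '\n' ∧ some x ≠ prev)).erase c := by
            apply Finset.ext; intro x
            simp only [Finset.mem_filter, Finset.mem_erase]
            constructor
            · rintro ⟨hx, hxn, hxc⟩
              exact ⟨by simpa using hxc, hx, hxn, hne x hx⟩
            · rintro ⟨hxc, hx, hxn, _⟩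
              exact ⟨hx, hxn, by simpa using hxc⟩
          have hfi : ((c :: cs).toFinset.filter (fun x => x ≠ '\n' ∧ some x ≠ prev))
              = insert c (cs.toFinset.filter (fun x => x ≠ '\n' ∧ some x ≠ prev)) := by
            rw [hins, Finset.filter_insert, if_pos ⟨hnl, hcp⟩]
          rw [hfi, hfc, if_pos ⟨hnl, hcp⟩]
          set S := cs.toFinset.filter (fun x => x ≠ '\n' ∧ some x ≠ prev) with hS
          have : insert c S = insert c (S.erase c) := by
            apply Finset.ext; intro x
            simp only [Finset.mem_insert, Finset.mem_erase]
            constructor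
            · rintro (rfl | hx); · exact Or.inl rfl
              · by_cases hxc : x = c
                · exact Or.inl hxc
                · exact Or.inr ⟨hxc, hx⟩
            · rintro (rfl | ⟨_, hx⟩); · exact Or.inl rfl
              · exact Or.inr hx
          rw [this, Finset.card_insert_of_notMem (Finset.notMem_erase c S)]
          omega
        · -- c = '\n': it counts nowhere, and prev never reappears
          push Not at hnl
          have hfi : ((c :: cs).toFinset.filter (fun x => x ≠ '\n' ∧ some x ≠ prev))
              = cs.toFinset.filter (fun x => x ≠ '\n' ∧ some x ≠ prev) := by
            rw [hins, Finset.filter_insert, if_neg (by simp [hnl])]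
          have hagree : cs.toFinset.filter (fun x => x ≠ '\n' ∧ some x ≠ prev)
              = cs.toFinset.filter (fun x => x ≠ '\n' ∧ some x ≠ some c) := by
            apply Finset.filter_congr
            intro x hx
            constructor
            · rintro ⟨hxn, _⟩
              refine ⟨hxn, ?_⟩
              simp only [ne_eq, Option.some_inj]
              intro h; exact hxn (h ▸ hnl)
            · rintro ⟨hxn, _⟩
              exact ⟨hxn, hne x hx⟩
          rw [hfi, hagree, if_neg (by simp [hnl])]
          omega
      · -- prev = some c: c is skipped by both sides
        push Not at hcp
        have hfi : ((c :: cs).toFinset.filter (fun x => x ≠ '\n' ∧ some x ≠ prev))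
            = cs.toFinset.filter (fun x => x ≠ '\n' ∧ some x ≠ some c) := by
          rw [hins, Finset.filter_insert, if_neg (by simp [← hcp]), ← hcp]
        rw [hfi, if_neg (by simp [← hcp])]
        omega
    simp only [List.foldl_cons]
    rw [ih hcs _ (some c)
      (by intro p hpc x hx; rw [← Option.some.inj hpc]; exact hcl x hx)]
    by_cases hc : c ≠ '\n' ∧ some c ≠ prev
    · rw [if_pos hc]; rw [if_pos hc] at key; push_cast [key]; ring
    · rw [if_neg hc]; rw [if_neg hc] at key; push_cast [key]; ring

-- B's per-group value equals the same distinct-character count.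
theorem pv_groupB_eq (cs : List Char) (t : Int) :
    ((PySem.List.sorted (PySem.Chars.rstrip cs) (fun c => c) false).foldl
      (fun (st : Int × Option Char) c =>
        (if c ≠ '\n' ∧ some c ≠ st.2 then st.1 + 1 else st.1, some c)) (t, none)).1
    = t + (((PySem.Chars.rstrip cs).filter (fun c => c ≠ '\n')).toFinset.card : Int) := by
  set r := PySem.Chars.rstrip cs with hr
  set s := PySem.List.sorted r (fun c => c) false with hsdef
  have hpw : s.Pairwise (· ≤ ·) := by
    have := PySem.List.sorted_pairwise r (fun c : Char => c) (κ := Char)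
    simpa [hsdef] using this
  rw [pv_runB s hpw t none (by rintro p ⟨⟩)]
  congr 2
  have hperm : s.Perm r := PySem.List.sorted_perm r (fun c : Char => c) false
  apply congrArg Finset.card
  apply Finset.ext
  intro x
  simp only [Finset.mem_filter, List.mem_toFinset, hperm.mem_iff, List.mem_filter]
  constructor
  · rintro ⟨hx, hn, -⟩; exact ⟨hx, by simpa using hn⟩
  · rintro ⟨hx, hn⟩; exact ⟨hx, by simpa using hn, by simp⟩

-- ===== VERDICT =====
theorem countAnswers_spec : Claim_equal_countAnswers := by
  intro groupAns _
  unfold Spec_countAnswers countAnswers countAnswers_alt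
  apply PySem.List.foldl_congr_mem
  intro acc ans _
  rw [pv_groupB_eq ans.toList acc]
  exact congrArg (acc + ·) (pv_groupA_eq ans.toList)
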